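-- pv_equiv track=rewrite | github.com/stratusadv/django-spire | django_spire/core/management/commands/spire_startapp_pkg/manager.py | get_missing_components
-- ===== SOURCE A (Python) =====
-- def get_missing_components(
--
--     components: list[str],
--     registry: list[str]
-- ) -> list[str]:
--     missing = []
--     total = len(components)
--
--     for i in range(total):
--         component = '.'.join(components[: i + 1])
--
--         if component not in registry and i > 0:
--             missing.append(component)
--
--     return missing
-- ===== SOURCE B (Python) =====
-- def get_missing_components(
--     components: list[str],
--     registry: list[str]
-- ) -> list[str]:
--     reg = set(registry)
--     missing = []
--     prefix = ''
--     for i, component in enumerate(components):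
--         prefix = component if i == 0 else prefix + '.' + component
--         if i > 0 and prefix not in reg:
--             missing.append(prefix)
--     return missing
-- ===== Notes on version B (the rewrite author's own statement) =====
-- stated objective: faster
-- what changed: Replaces the per-index join of a fresh slice and the linear registry list scan with a single pass that extends the dotted prefix incrementally and tests membership in a set built once.
import Mathlib
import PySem

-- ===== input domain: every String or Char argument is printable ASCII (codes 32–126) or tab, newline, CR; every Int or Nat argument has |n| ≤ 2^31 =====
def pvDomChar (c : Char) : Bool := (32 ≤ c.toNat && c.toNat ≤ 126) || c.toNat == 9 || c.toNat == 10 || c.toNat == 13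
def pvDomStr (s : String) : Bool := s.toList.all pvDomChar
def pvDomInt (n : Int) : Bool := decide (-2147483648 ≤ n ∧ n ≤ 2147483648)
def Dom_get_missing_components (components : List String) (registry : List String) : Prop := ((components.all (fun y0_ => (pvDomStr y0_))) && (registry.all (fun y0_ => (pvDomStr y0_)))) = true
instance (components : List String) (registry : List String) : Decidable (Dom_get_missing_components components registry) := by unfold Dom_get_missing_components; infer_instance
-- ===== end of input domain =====

-- B builds the dotted prefix incrementally in one pass and tests membership in a set
-- built once, instead of A's per-index join of a fresh slice plus a list scan.

-- ===== PORT A =====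
def get_missing_components (components : List String) (registry : List String) : List String :=
  let total : Int := components.length
  (PySem.List.pyRange 0 total 1).foldl
    (fun missing i =>
      let component := PySem.Str.join "." (PySem.List.slice components none (some (i + 1)))
      if ¬ registry.contains component ∧ i > 0 then missing ++ [component] else missing)
    []

-- ===== PORT B =====
def get_missing_components_alt (components : List String) (registry : List String) : List String :=
  let reg : PySem.Set String := PySem.Set.ofList registry
  let st :=
    (PySem.List.enumerate components 0).foldl
      (fun (st : String × List String) ic =>
        let pre := if ic.1 = 0 then ic.2 else st.1 ++ "." ++ ic.2
        let missing :=
          if ic.1 > 0 ∧ ¬ PySem.Set.contains reg pre then st.2 ++ [pre] else st.2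
        (pre, missing))
      ("", [])
  st.2

-- ===== PRECONDITION & SPEC =====
def Spec_get_missing_components (components : List String) (registry : List String) (out : List String) : Prop := out = get_missing_components_alt components registry
instance (components : List String) (registry : List String) (out : List String) : Decidable (Spec_get_missing_components components registry out) := by unfold Spec_get_missing_components; infer_instance

-- ===== CLAIM (what is proved, stated in full; the proofs are below) =====
def Claim_equal_get_missing_components : Prop := ∀ (components : List String) (registry : List String), Dom_get_missing_components components registry → Spec_get_missing_components components registry (get_missing_components components registry)

-- ===== LEMMAS AND PROOFS =====

-- set(registry) membership agrees with the list scan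
theorem contains_ofList {α : Type} [BEq α] [LawfulBEq α] (xs : List α) (y : α) :
    PySem.Set.contains (PySem.Set.ofList xs) y = xs.contains y := by
  simp [PySem.Set.contains]

-- joining one more chunk at the Chars level
theorem chars_join_append (sep : List Char) (cs : List (List Char)) (d : List Char) (h : cs ≠ []) :
    PySem.Chars.join sep (cs ++ [d]) = PySem.Chars.join sep cs ++ sep ++ d := by
  induction cs with
  | nil => exact absurd rfl h
  | cons a ys ih =>
    cases ys with
    | nil => simp [PySem.Chars.join_cons_cons, PySem.Chars.join_singleton]
    | cons b zs =>
      rw [show (a :: b :: zs) ++ [d] = a :: (b :: (zs ++ [d])) by simp,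
        PySem.Chars.join_cons_cons, show b :: (zs ++ [d]) = (b :: zs) ++ [d] by simp,
        ih (by simp), PySem.Chars.join_cons_cons]
      simp

-- joining one more part appends '.' ++ part, when the list is nonempty
theorem join_append_singleton (xs : List String) (x : String) (h : xs ≠ []) :
    PySem.Str.join "." (xs ++ [x]) = PySem.Str.join "." xs ++ "." ++ x := by
  apply String.toList_inj.mp
  simp only [PySem.Str.toList_join, String.toList_append, List.map_append, List.map_cons,
    List.map_nil]
  rw [chars_join_append _ _ _ (by simpa using h)]

-- A appended one more component: the loop over range(n+1) splits off its last step
theorem A_append (registry : List String) (xs : List String) (x : String) :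
    get_missing_components (xs ++ [x]) registry =
      get_missing_components xs registry ++
        (if ¬ registry.contains (PySem.Str.join "." (xs ++ [x])) ∧ ((xs.length : Int)) > 0
          then [PySem.Str.join "." (xs ++ [x])] else []) := by
  unfold get_missing_components
  simp only [List.length_append, List.length_cons, List.length_nil]
  have hlen : ((xs.length + 1 : Nat) : Int) = (xs.length : Int) + 1 := by push_cast; ring
  rw [hlen, PySem.List.pyRange_one_succ_right (by omega : (0:Int) ≤ (xs.length : Int)),
    List.foldl_append]
  have hcongr :
      (PySem.List.pyRange 0 (xs.length : Int) 1).foldl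
        (fun missing i =>
          let component := PySem.Str.join "." (PySem.List.slice (xs ++ [x]) none (some (i + 1)))
          if ¬ registry.contains component ∧ i > 0 then missing ++ [component] else missing) [] =
      (PySem.List.pyRange 0 (xs.length : Int) 1).foldl
        (fun missing i =>
          let component := PySem.Str.join "." (PySem.List.slice xs none (some (i + 1)))
          if ¬ registry.contains component ∧ i > 0 then missing ++ [component] else missing) [] := by
    apply PySem.List.foldl_congr_mem
    intro acc i hi
    have hib := (PySem.List.mem_pyRange_one).mp hi
    have h0 : (0 : Int) ≤ i + 1 := by omega
    have htake : PySem.List.slice (xs ++ [x]) none (some (i + 1)) =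
        PySem.List.slice xs none (some (i + 1)) := by
      rw [PySem.List.slice_to (xs ++ [x]) h0, PySem.List.slice_to xs h0,
        List.take_append_of_le_length (by omega : (i + 1).toNat ≤ xs.length)]
    simp only [htake]
  rw [hcongr]
  simp only [List.foldl_cons, List.foldl_nil]
  have hslice : PySem.List.slice (xs ++ [x]) none (some ((xs.length : Int) + 1)) = xs ++ [x] := by
    rw [PySem.List.slice_to _ (by omega)]
    simp
  rw [hslice]
  split_ifs <;> simp

-- B's loop state after processing xs: (join('.', xs), A(xs, registry))
theorem B_loop (registry : List String) (xs : List String) :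
    (PySem.List.enumerate xs 0).foldl
      (fun (st : String × List String) ic =>
        let pre := if ic.1 = 0 then ic.2 else st.1 ++ "." ++ ic.2
        let missing :=
          if ic.1 > 0 ∧ ¬ PySem.Set.contains (PySem.Set.ofList registry) pre
            then st.2 ++ [pre] else st.2
        (pre, missing))
      ("", []) =
    (PySem.Str.join "." xs, get_missing_components xs registry) := by
  induction xs using List.reverseRecOn with
  | nil =>
    simp [PySem.List.enumerate, get_missing_components, PySem.List.pyRange_one_eq_nil,
      PySem.Str.join, PySem.Chars.join, List.intercalate]
  | append_singleton ys y ih =>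
    rw [PySem.List.enumerate_append, List.foldl_append, ih]
    simp only [PySem.List.enumerate, List.foldl_cons, List.foldl_nil]
    rw [A_append]
    cases ys with
    | nil =>
      simp [get_missing_components, PySem.List.pyRange_one_eq_nil, PySem.Str.join,
        PySem.Chars.join_singleton]
    | cons b bs =>
      rw [join_append_singleton _ _ (by simp), contains_ofList]
      have h0 : ¬ ((0 : Int) + ((b :: bs).length : Int) = 0) := by simp only [List.length_cons, Nat.cast_add, Nat.cast_one]; omega
      have h1 : (0 : Int) + ((b :: bs).length : Int) > 0 := by simp only [List.length_cons, Nat.cast_add, Nat.cast_one]; omega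
      have h1' : ((b :: bs).length : Int) > 0 := by simp only [List.length_cons, Nat.cast_add, Nat.cast_one]; omega
      simp only [if_neg h0, h1, true_and, h1', and_true]
      split_ifs <;> simp

-- ===== VERDICT (by name: the statement is the Claim_ definition above) =====
theorem get_missing_components_spec : Claim_equal_get_missing_components := by
  intro components registry _
  unfold Spec_get_missing_components
  simp only [get_missing_components_alt, B_loop]
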